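-- pv_equiv track=rewrite | github.com/elecpure2/Hoyoverse_Redeem_Discord_Bot | utils/prydwen_hsr.py | search_items
-- ===== SOURCE A (Python) =====
-- def search_items(query: str, item_dict: dict, limit: int = 10) -> list:
--     """이름 검색 (부분 일치, 한/영 모두). 반환: [(이름, value), ...]"""
--     query_lower = query.lower()
--
--     # 정확 일치
--     exact = [(name, val) for name, val in item_dict.items() if name.lower() == query_lower]
--     if exact:
--         return exact
--
--     # 영어 이름도 검색 (캐릭터의 경우)
--     for name, val in item_dict.items():
--         if isinstance(val, dict) and val.get("name_en", "").lower() == query_lower: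
--             return [(name, val)]
--
--     # 부분 일치 (한글 + 영어)
--     partial = []
--     for name, val in item_dict.items():
--         if query_lower in name.lower():
--             partial.append((name, val))
--         elif isinstance(val, dict) and query_lower in val.get("name_en", "").lower():
--             partial.append((name, val))
--     return partial[:limit]
-- ===== SOURCE B (Python) =====
-- def search_items(query: str, item_dict: dict, limit: int = 10) -> list:
--     """One classifying pass over the items, then apply the priority exact > english > partial."""
--     query_lower = query.lower()
--     exact, english, partial = [], [], []
--     for name, val in item_dict.items():
--         name_lower = name.lower()
--         en_lower = val.get("name_en", "").lower() if isinstance(val, dict) else None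
--         if name_lower == query_lower:
--             exact.append((name, val))
--         if en_lower == query_lower:
--             english.append((name, val))
--         if query_lower in name_lower or (en_lower is not None and query_lower in en_lower):
--             partial.append((name, val))
--     if exact:
--         return exact
--     if english:
--         return [english[0]]
--     return partial[:limit]
-- ===== Notes on version B (the rewrite author's own statement) =====
-- stated objective: alternative
-- what changed: A's three separate scans with early returns (exact comprehension, english first-match loop, partial append loop) are replaced by one classifying pass that buckets every entry into exact/english/partial lists, followed by a single priority decision (exact, else [english[0]], else partial[:limit]).
import Mathlib
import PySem

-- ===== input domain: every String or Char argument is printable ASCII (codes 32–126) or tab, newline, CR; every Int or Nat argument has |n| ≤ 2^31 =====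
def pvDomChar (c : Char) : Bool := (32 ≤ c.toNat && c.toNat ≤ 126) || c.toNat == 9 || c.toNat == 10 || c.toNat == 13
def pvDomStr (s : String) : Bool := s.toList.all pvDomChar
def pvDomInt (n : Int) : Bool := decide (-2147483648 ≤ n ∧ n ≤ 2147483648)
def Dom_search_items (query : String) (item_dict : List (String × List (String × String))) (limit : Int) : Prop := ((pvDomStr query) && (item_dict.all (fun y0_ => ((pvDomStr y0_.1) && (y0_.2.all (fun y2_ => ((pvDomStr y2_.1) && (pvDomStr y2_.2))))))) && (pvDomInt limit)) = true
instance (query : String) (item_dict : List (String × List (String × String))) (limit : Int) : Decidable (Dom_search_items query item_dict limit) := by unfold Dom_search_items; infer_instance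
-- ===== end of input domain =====

-- B replaces A's three scans with early returns by one classifying pass into three
-- buckets plus a final priority decision (alternative decomposition, same cost).


-- shared helper: val.get("name_en", "") on the association list (first match, as in a dict with unique keys)
def pvGetNameEn (val : List (String × String)) : String :=
  match val.find? (fun p => p.1 == "name_en") with
  | some p => p.2
  | none => ""

-- ===== PORT A =====
def search_items (query : String) (item_dict : List (String × List (String × String))) (limit : Int) : List (String × (List (String × String))) :=
  let query_lower := PySem.Str.lower query
  -- exact = [(name, val) for name, val in item_dict.items() if name.lower() == query_lower]
  let exact := item_dict.filter (fun p => PySem.Str.lower p.1 == query_lower)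
  if exact.isEmpty then
    -- english first-match loop (isinstance(val, dict) is always true at this type)
    match item_dict.find? (fun p => PySem.Str.lower (pvGetNameEn p.2) == query_lower) with
    | some p => [p]
    | none =>
      -- partial append loop with if/elif
      let part := item_dict.foldl (fun acc p =>
        if PySem.Str.isIn query_lower (PySem.Str.lower p.1) then acc ++ [p]
        else if PySem.Str.isIn query_lower (PySem.Str.lower (pvGetNameEn p.2)) then acc ++ [p]
        else acc) []
      PySem.List.slice part none (some limit)
  else exact

-- ===== PORT B =====
def search_items_alt (query : String) (item_dict : List (String × List (String × String))) (limit : Int) : List (String × (List (String × String))) :=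
  let query_lower := PySem.Str.lower query
  -- one classifying pass into three buckets (isinstance(val, dict) is always true at this type)
  let buckets := item_dict.foldl
    (fun (acc : List (String × List (String × String)) × List (String × List (String × String)) × List (String × List (String × String))) p =>
      let name_lower := PySem.Str.lower p.1
      let en_lower := PySem.Str.lower (pvGetNameEn p.2)
      ( (if name_lower == query_lower then acc.1 ++ [p] else acc.1),
        (if en_lower == query_lower then acc.2.1 ++ [p] else acc.2.1),
        (if PySem.Str.isIn query_lower name_lower || PySem.Str.isIn query_lower en_lower then acc.2.2 ++ [p] else acc.2.2) ))
    ([], [], [])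
  if buckets.1.isEmpty then
    match buckets.2.1 with
    | x :: _ => [x]
    | [] => PySem.List.slice buckets.2.2 none (some limit)
  else buckets.1

-- ===== PRECONDITION & SPEC =====
-- Pre_ requires all dict keys (outer and inner) to be distinct: a Python dict cannot hold
-- duplicate keys, so association lists with duplicates represent no Python input at all.
def Pre_search_items (query : String) (item_dict : List (String × List (String × String))) (limit : Int) : Prop :=
  (item_dict.map (·.1)).Nodup ∧ ∀ p ∈ item_dict, (p.2.map (·.1)).Nodup
instance (query : String) (item_dict : List (String × List (String × String))) (limit : Int) : Decidable (Pre_search_items query item_dict limit) := by unfold Pre_search_items; infer_instance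
def pvWitness_search_items : String × (List (String × List (String × String))) × Int :=
  ("kafka", [("Kafka kr", [("name_en", "Kafka")]), ("blade", [("name_en", "Blade")])], 10)

def Spec_search_items (query : String) (item_dict : List (String × List (String × String))) (limit : Int) (out : List (String × (List (String × String)))) : Prop := out = search_items_alt query item_dict limit
instance (query : String) (item_dict : List (String × List (String × String))) (limit : Int) (out : List (String × (List (String × String)))) : Decidable (Spec_search_items query item_dict limit out) := by unfold Spec_search_items; infer_instance

-- ===== CLAIM (what is proved, stated in full; the proofs are below) =====
def Claim_equal_search_items : Prop := ∀ (query : String) (item_dict : List (String × List (String × String))) (limit : Int), Dom_search_items query item_dict limit → Pre_search_items query item_dict limit → Spec_search_items query item_dict limit (search_items query item_dict limit)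

-- ===== LEMMAS AND PROOFS =====

-- B's classifying fold computes the three filters of the list.
theorem buckets_eq (ql : String) (d : List (String × List (String × String)))
    (a b c : List (String × List (String × String))) :
    d.foldl
      (fun (acc : List (String × List (String × String)) × List (String × List (String × String)) × List (String × List (String × String))) p =>
        let name_lower := PySem.Str.lower p.1
        let en_lower := PySem.Str.lower (pvGetNameEn p.2)
        ( (if name_lower == ql then acc.1 ++ [p] else acc.1),
          (if en_lower == ql then acc.2.1 ++ [p] else acc.2.1),
          (if PySem.Str.isIn ql name_lower || PySem.Str.isIn ql en_lower then acc.2.2 ++ [p] else acc.2.2) ))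
      (a, b, c)
    = (a ++ d.filter (fun p => PySem.Str.lower p.1 == ql),
       b ++ d.filter (fun p => PySem.Str.lower (pvGetNameEn p.2) == ql),
       c ++ d.filter (fun p => PySem.Str.isIn ql (PySem.Str.lower p.1) || PySem.Str.isIn ql (PySem.Str.lower (pvGetNameEn p.2)))) := by
  induction d generalizing a b c with
  | nil => simp
  | cons x t ih =>
    simp only [List.foldl_cons, List.filter_cons]
    rw [ih]
    split_ifs <;> simp_all

-- A's partial append if/elif loop is the filter by the disjunction.
theorem partial_eq (ql : String) (d : List (String × List (String × String)))
    (acc : List (String × List (String × String))) :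
    d.foldl (fun acc p =>
        if PySem.Str.isIn ql (PySem.Str.lower p.1) then acc ++ [p]
        else if PySem.Str.isIn ql (PySem.Str.lower (pvGetNameEn p.2)) then acc ++ [p]
        else acc) acc
    = acc ++ d.filter (fun p => PySem.Str.isIn ql (PySem.Str.lower p.1) || PySem.Str.isIn ql (PySem.Str.lower (pvGetNameEn p.2))) := by
  induction d generalizing acc with
  | nil => simp
  | cons x t ih =>
    simp only [List.foldl_cons, List.filter_cons]
    split_ifs <;> simp_all

-- first-match loop = head of the filter
theorem find?_eq_head?_filter {α : Type} (p : α → Bool) (l : List α) :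
    l.find? p = (l.filter p).head? := by
  induction l with
  | nil => rfl
  | cons x t ih =>
    rw [List.find?_cons, List.filter_cons]
    by_cases h : p x
    · simp [h]
    · simp only [h, if_neg, Bool.false_eq_true, reduceCtorEq]
      simpa [h] using ih

-- ===== VERDICT (by name: the statement is the Claim_ definition above) =====
theorem search_items_spec : Claim_equal_search_items := by
  intro query item_dict limit _ _
  unfold Spec_search_items search_items search_items_alt
  simp only [buckets_eq, partial_eq, List.nil_append]
  rw [find?_eq_head?_filter]
  cases h : (item_dict.filter (fun p => PySem.Str.lower p.1 == PySem.Str.lower query)).isEmpty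
  · simp [h]
  · simp only [h, if_true]
    cases hf : (item_dict.filter (fun p => PySem.Str.lower (pvGetNameEn p.2) == PySem.Str.lower query)) <;> simp [hf]
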